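-- pv_equiv track=rewrite | github.com/polinaakinshinaa/Homework.Synergy | дз5.py | capitalize_text
-- ===== SOURCE A (Python) =====
-- def capitalize_text(text):
--     result = ""
--     capitalize_next = True
--     for char in text:
--         if char.isalpha():
--             if capitalize_next:
--                 result += char.upper()
--                 capitalize_next = False
--             else:
--                 result += char
--         else:
--             result += char
--             if char in [".", "!", "?"]:
--                 capitalize_next = True
--             elif char == " ":
--                 capitalize_next = True
--     return result
-- ===== SOURCE B (Python) =====
-- def capitalize_text(text):
--     # Boundary-driven scanner: at start of string and after each delimiter,
--     # skip the run of non-letter, non-delimiter characters and uppercase the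
--     # first letter that follows; all other characters are copied verbatim.
--     delims = ".!? "
--     n = len(text)
--
--     def boundary(j):
--         # From a boundary at j: skip non-letter non-delimiter chars; if a
--         # letter follows, return the run plus the uppercased letter.
--         k = j
--         while k < n and not text[k].isalpha() and text[k] not in delims:
--             k += 1
--         if k < n and text[k].isalpha():
--             return text[j:k] + text[k].upper(), k + 1
--         return "", j
--
--     first, i = boundary(0)
--     out = [first]
--     while i < n:
--         c = text[i]
--         out.append(c)
--         if c in delims:
--             piece, i2 = boundary(i + 1)
--             out.append(piece)
--             i = i2
--         else:
--             i += 1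
--     return ''.join(out)
-- ===== Notes on version B (the rewrite author's own statement) =====
-- stated objective: alternative
-- what changed: Replaced A's char-by-char boolean-flag loop with a boundary-driven scanner that, at the string start and after each delimiter, skips the non-letter non-delimiter run in one lookahead and uppercases the letter that follows; all other characters are copied verbatim.
import Mathlib
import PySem

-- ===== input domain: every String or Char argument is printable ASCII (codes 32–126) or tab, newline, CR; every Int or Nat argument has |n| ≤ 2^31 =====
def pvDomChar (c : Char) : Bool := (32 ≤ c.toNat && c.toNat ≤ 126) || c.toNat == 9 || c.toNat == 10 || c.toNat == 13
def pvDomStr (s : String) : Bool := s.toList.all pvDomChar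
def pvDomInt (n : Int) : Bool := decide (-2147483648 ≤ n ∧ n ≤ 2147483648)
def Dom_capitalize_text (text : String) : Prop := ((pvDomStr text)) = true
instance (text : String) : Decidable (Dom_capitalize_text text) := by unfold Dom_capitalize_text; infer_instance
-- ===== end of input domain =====

-- B replaces A's char-by-char boolean-flag loop with a boundary-driven scanner
-- (skip the non-letter run after each boundary, uppercase the letter that follows);
-- objective: alternative (same cost, different algorithm).

-- ===== PORT A =====
-- literal port of A: accumulate result char by char with a capitalize_next flag
def pvAGo : Bool → List Char → List Char
  | _, [] => []
  | flag, c :: rest =>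
    if PySem.Chars.isalpha c then
      (if flag then PySem.Chars.upperChar c :: pvAGo false rest
       else c :: pvAGo false rest)
    else
      c :: (if c = '.' ∨ c = '!' ∨ c = '?' then pvAGo true rest
            else if c = ' ' then pvAGo true rest
            else pvAGo flag rest)

def capitalize_text (text : String) : String := String.mk (pvAGo true text.toList)

-- ===== PORT B =====
-- delimiter test ('.', '!', '?', ' ')
def pvDelim (c : Char) : Bool := c == '.' || c == '!' || c == '?' || c == ' '
-- neither a letter nor a delimiter (the characters boundary skips)
def pvNd (c : Char) : Bool := !PySem.Chars.isalpha c && !pvDelim c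

-- Source B's boundary(j): (emitted piece, remaining suffix)
def pvBoundary (cs : List Char) : List Char × List Char :=
  match cs.dropWhile pvNd with
  | a :: r =>
    if PySem.Chars.isalpha a then (cs.takeWhile pvNd ++ [PySem.Chars.upperChar a], r)
    else ([], cs)
  | [] => ([], cs)

theorem pvBoundary_len (cs : List Char) : (pvBoundary cs).2.length ≤ cs.length := by
  unfold pvBoundary
  rcases h : cs.dropWhile pvNd with _ | ⟨a, r⟩ <;> simp
  split <;> simp
  have := cs.length_dropWhile_le (p := pvNd)
  rw [h] at this; simp at this; omega

-- Source B's main while loop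
def pvBGo : List Char → List Char
  | [] => []
  | c :: rest =>
    if pvDelim c then
      c :: ((pvBoundary rest).1 ++ pvBGo (pvBoundary rest).2)
    else c :: pvBGo rest
termination_by cs => cs.length
decreasing_by
  · have := pvBoundary_len rest; simp; omega
  · simp

def capitalize_text_alt (text : String) : String :=
  String.mk ((pvBoundary text.toList).1 ++ pvBGo (pvBoundary text.toList).2)

-- ===== PRECONDITION & SPEC =====
def Spec_capitalize_text (text : String) (out : String) : Prop := out = capitalize_text_alt text
instance (text : String) (out : String) : Decidable (Spec_capitalize_text text out) := by unfold Spec_capitalize_text; infer_instance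

-- ===== CLAIM (what is proved, stated in full; the proofs are below) =====
def Claim_equal_capitalize_text : Prop := ∀ (text : String), Dom_capitalize_text text → Spec_capitalize_text text (capitalize_text text)

-- ===== LEMMAS AND PROOFS =====

-- proof-only helper: A's behaviour with the flag set (capitalize the next letter, then hand over to B's loop)
def pvCap : List Char → List Char
  | [] => []
  | c :: r => if PySem.Chars.isalpha c then PySem.Chars.upperChar c :: pvBGo r else c :: pvCap r

theorem delim_not_alpha {c : Char} (h : pvDelim c = true) : PySem.Chars.isalpha c = false := by
  simp [pvDelim] at h
  rcases h with ((h | h) | h) | h <;> subst h <;> decide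

theorem alpha_not_delim {c : Char} (h : PySem.Chars.isalpha c = true) : pvDelim c = false := by
  by_cases hd : pvDelim c = true
  · rw [delim_not_alpha hd] at h; exact absurd h (by simp)
  · simpa using hd

theorem boundary_cons_alpha {c : Char} (r : List Char) (ha : PySem.Chars.isalpha c = true) :
    pvBoundary (c :: r) = ([PySem.Chars.upperChar c], r) := by
  have hnd : pvNd c = false := by simp [pvNd, ha]
  simp [pvBoundary, hnd, ha]

theorem boundary_cons_delim {c : Char} (r : List Char) (hd : pvDelim c = true) :
    pvBoundary (c :: r) = ([], c :: r) := by
  have hnd : pvNd c = false := by simp [pvNd, hd]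
  simp [pvBoundary, hnd, delim_not_alpha hd]

theorem cap_eq_boundary (cs : List Char) :
    pvCap cs = (pvBoundary cs).1 ++ pvBGo (pvBoundary cs).2 := by
  induction cs with
  | nil => simp [pvCap, pvBoundary, pvBGo]
  | cons c r ih =>
    by_cases ha : PySem.Chars.isalpha c = true
    · simp [pvCap, ha, boundary_cons_alpha r ha]
    · simp at ha
      by_cases hd : pvDelim c = true
      · rw [boundary_cons_delim r hd]
        simp only [pvCap, ha, Bool.false_eq_true, if_false, pvBGo, hd, ite_true,
          List.nil_append]
        rw [ih]
      · have hnd : pvNd c = true := by simp [pvNd, ha, hd]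
        simp only [pvCap, ha, Bool.false_eq_true, if_false]
        rw [ih]
        unfold pvBoundary
        simp only [List.dropWhile_cons, hnd, ite_true, List.takeWhile_cons]
        rcases h : r.dropWhile pvNd with _ | ⟨a, rr⟩
        · simp [pvBGo, hd]
        · by_cases haa : PySem.Chars.isalpha a = true
          · simp [haa]
          · simp [haa, pvBGo, hd]

theorem ago_eq (cs : List Char) :
    pvAGo true cs = pvCap cs ∧ pvAGo false cs = pvBGo cs := by
  induction cs with
  | nil => simp [pvAGo, pvCap, pvBGo]
  | cons c r ih =>
    constructor
    · by_cases ha : PySem.Chars.isalpha c = true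
      · simp [pvAGo, ha, pvCap, ih.2]
      · simp at ha
        simp only [pvAGo, ha, Bool.false_eq_true, if_false, pvCap]
        split <;> simp_all
    · by_cases ha : PySem.Chars.isalpha c = true
      · have hd : pvDelim c = false := alpha_not_delim ha
        simp [pvAGo, ha, pvBGo, hd, ih.2]
      · simp at ha
        by_cases hd : pvDelim c = true
        · have h4 : (c = '.' ∨ c = '!' ∨ c = '?') ∨ c = ' ' := by
            simp [pvDelim] at hd; tauto
          simp only [pvAGo, ha, Bool.false_eq_true, if_false, pvBGo, hd]
          rcases h4 with h | h
          · simp [h, ih.1, cap_eq_boundary]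
          · subst h
            simp [ih.1, cap_eq_boundary]
        · have h1 : ¬(c = '.' ∨ c = '!' ∨ c = '?') := by
            simp [pvDelim] at hd; tauto
          have h2 : c ≠ ' ' := by simp [pvDelim] at hd; tauto
          simp [pvAGo, ha, h1, h2, pvBGo, hd, ih.2]

-- ===== VERDICT (by name: the statement is the Claim_ definition above) =====
theorem capitalize_text_spec : Claim_equal_capitalize_text := by
  intro text _
  unfold Spec_capitalize_text capitalize_text capitalize_text_alt
  rw [(ago_eq text.toList).1, cap_eq_boundary]
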